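-- pv_equiv track=rewrite | github.com/Jonontop/School | OSPR/Vaje/Vaja_1f.py | uredi_po_max
-- ===== SOURCE A (Python) =====
-- def uredi_po_max(seznam):
--     n = len(seznam)
--     for i in range(1, n):
--         key = seznam[i]
--         j = i - 1
--         while j >= 0 and max(key) < max(seznam[j]):
--             seznam[j + 1] = seznam[j]
--             j -= 1
--         seznam[j + 1] = key
--     return seznam
-- ===== SOURCE B (Python) =====
-- def uredi_po_max(seznam):
--     def msort(xs):
--         if len(xs) <= 1:
--             return xs
--         mid = len(xs) // 2
--         left = msort(xs[:mid])
--         right = msort(xs[mid:])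
--         merged = []
--         i = j = 0
--         while i < len(left) and j < len(right):
--             if max(left[i]) <= max(right[j]):
--                 merged.append(left[i])
--                 i += 1
--             else:
--                 merged.append(right[j])
--                 j += 1
--         merged.extend(left[i:])
--         merged.extend(right[j:])
--         return merged
--     seznam[:] = msort(seznam)
--     return seznam
-- ===== Notes on version B (the rewrite author's own statement) =====
-- stated objective: faster
-- what changed: Replaces the index-shifting insertion sort with a recursive stable merge sort keyed on max (take-left on equal maxes), written back in place.
import Mathlib
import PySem

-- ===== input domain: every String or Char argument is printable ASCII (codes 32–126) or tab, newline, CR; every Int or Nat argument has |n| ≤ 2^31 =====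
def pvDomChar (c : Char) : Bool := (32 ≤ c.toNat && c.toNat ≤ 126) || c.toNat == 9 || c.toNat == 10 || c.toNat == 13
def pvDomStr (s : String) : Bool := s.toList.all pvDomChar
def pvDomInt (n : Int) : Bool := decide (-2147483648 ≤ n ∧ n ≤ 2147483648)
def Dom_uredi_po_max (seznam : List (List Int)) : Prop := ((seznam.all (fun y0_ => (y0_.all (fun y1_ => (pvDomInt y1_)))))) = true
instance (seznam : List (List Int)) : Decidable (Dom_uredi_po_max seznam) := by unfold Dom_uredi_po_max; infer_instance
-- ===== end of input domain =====

-- B replaces A's index-shifting insertion sort with a recursive stable merge sort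
-- keyed on max (take-left on equal maxes), written back in place; both mutate the
-- list in place and return it, so the return-value equivalence proved here covers
-- the observable effect as well.

-- ===== PORT A =====
-- Python max(l) on an Int list; 0 stands in for the empty list, where Python raises
-- ValueError (such inputs are outside Pre_ whenever the value is consulted).
def pyMaxInt (l : List Int) : Int :=
  match l with
  | [] => 0
  | x :: t => t.foldl max x

-- the inner 'while j >= 0 and max(key) < max(seznam[j])' shift loop; fuel = i bounds
-- the iteration count (the loop runs at most i times), and when fuel hits 0 the
-- condition is necessarily false, so the fuel-0 arm is the loop-exit assignment.
-- seznam[j] / seznam[j+1] are always in range in A, so .getD [] / .set are exact.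
def urediInner (fuel : Nat) (s : List (List Int)) (key : List Int) (j : Int) : List (List Int) :=
  match fuel with
  | 0 => s.set (j + 1).toNat key
  | fuel + 1 =>
    if j ≥ 0 ∧ pyMaxInt key < pyMaxInt ((PySem.List.pyGet? s j).getD []) then
      urediInner fuel (s.set (j + 1).toNat ((PySem.List.pyGet? s j).getD [])) key (j - 1)
    else
      s.set (j + 1).toNat key

def uredi_po_max (seznam : List (List Int)) : List (List Int) :=
  let n : Int := seznam.length
  (PySem.List.pyRange 1 n).foldl
    (fun s i =>
      let key := (PySem.List.pyGet? s i).getD []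
      urediInner i.toNat s key (i - 1)) seznam

-- ===== PORT B =====
-- Source B's merge loop: take left while max(left[i]) <= max(right[j]), else right;
-- the trailing extends are the [], _ / _, [] arms.
def mergeB (l r : List (List Int)) : List (List Int) :=
  match l, r with
  | [], r => r
  | l, [] => l
  | a :: l', b :: r' =>
    if pyMaxInt a ≤ pyMaxInt b then a :: mergeB l' (b :: r')
    else b :: mergeB (a :: l') r'
termination_by l.length + r.length

-- Source B's msort: length ≤ 1 base case, split at mid = len//2 (xs[:mid] / xs[mid:]
-- with 0 ≤ mid ≤ len are exactly take/drop), recursive sort, merge.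
def msortB (xs : List (List Int)) : List (List Int) :=
  if h : xs.length ≤ 1 then xs
  else
    mergeB (msortB (xs.take (xs.length / 2))) (msortB (xs.drop (xs.length / 2)))
termination_by xs.length
decreasing_by
  · simp only [List.length_take]; omega
  · simp only [List.length_drop]; omega

-- Source B: seznam[:] = msort(seznam); return seznam
def uredi_po_max_alt (seznam : List (List Int)) : List (List Int) :=
  msortB seznam

-- ===== PRECONDITION & SPEC =====
-- Pre_ excludes exactly the inputs on which Python raises ValueError (max([])):
-- both A and B raise precisely when the list has length ≥ 2 and contains an empty
-- inner list (on length ≤ 1 neither program ever calls max and both return the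
-- input unchanged, so such inputs stay inside Pre_).
def Pre_uredi_po_max (seznam : List (List Int)) : Prop :=
  seznam.length ≤ 1 ∨ ∀ l ∈ seznam, l ≠ []
instance (seznam : List (List Int)) : Decidable (Pre_uredi_po_max seznam) := by
  unfold Pre_uredi_po_max; infer_instance

def pvWitness_uredi_po_max : List (List Int) := [[3, 1], [2], [0, 5]]

def Spec_uredi_po_max (seznam : List (List Int)) (out : List (List Int)) : Prop := out = uredi_po_max_alt seznam
instance (seznam : List (List Int)) (out : List (List Int)) : Decidable (Spec_uredi_po_max seznam out) := by unfold Spec_uredi_po_max; infer_instance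

-- ===== CLAIM (what is proved, stated in full; the proofs are below) =====
def Claim_equal_uredi_po_max : Prop := ∀ (seznam : List (List Int)), Dom_uredi_po_max seznam → Pre_uredi_po_max seznam → Spec_uredi_po_max seznam (uredi_po_max seznam)

-- ===== LEMMAS AND PROOFS =====

-- shorthand for the insertion predicate sorted(·, key=pyMaxInt) uses
def befMax (a b : List Int) : Bool := decide (pyMaxInt a < pyMaxInt b)

def ins (x : List Int) (acc : List (List Int)) : List (List Int) :=
  PySem.List.insertBy befMax x acc

theorem insertBy_cons (x y : List Int) (ys : List (List Int)) :
    ins x (y :: ys) = if befMax x y then x :: y :: ys else y :: ins x ys := by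
  simp [ins, PySem.List.insertBy]

theorem ins_nil (x : List Int) : ins x [] = [x] := by
  simp [ins, PySem.List.insertBy]

-- ---------- A-side: the insertion-sort port computes PySem.List.sorted ----------

theorem insertBy_append_last (x b : List Int) (p : List (List Int))
    (h : befMax x b = true) :
    ins x (p ++ [b]) = ins x p ++ [b] := by
  induction p with
  | nil => simp [h, ins, PySem.List.insertBy]
  | cons y ys ih =>
    simp only [List.cons_append, insertBy_cons]
    by_cases hxy : befMax x y = true
    · simp [hxy]
    · simp only [Bool.not_eq_true] at hxy
      simp [hxy, ih]

-- the shift loop inserts key into the sorted prefix: for a sorted pref and any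
-- stale value 'hole' at position pref.length,
theorem urediInner_spec (pref : List (List Int)) :
    pref.Pairwise (fun a b => pyMaxInt a ≤ pyMaxInt b) →
    ∀ (hole key : List Int) (rest : List (List Int)),
      urediInner pref.length (pref ++ hole :: rest) key ((pref.length : Int) - 1) =
        ins key pref ++ rest := by
  induction pref using List.reverseRecOn with
  | nil =>
    intro _ hole key rest
    simp [urediInner, ins, PySem.List.insertBy]
  | append_singleton p b ih =>
    intro hpair hole key rest
    rw [List.pairwise_append] at hpair
    obtain ⟨hp, -, hpb⟩ := hpair
    have hlen : (p ++ [b]).length = p.length + 1 := by simp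
    have hget : (PySem.List.pyGet? ((p ++ [b]) ++ hole :: rest) ((p.length : Int))).getD [] = b := by
      rw [show ((p.length : Int)) = ((p.length : Nat) : Int) from rfl, PySem.List.pyGet?_natCast]
      simp
    rw [hlen]
    show urediInner (p.length + 1) ((p ++ [b]) ++ hole :: rest) key (((p.length + 1 : Nat) : Int) - 1) = _
    rw [urediInner]
    have hj : (((p.length + 1 : Nat) : Int) - 1) = (p.length : Int) := by push_cast; ring
    rw [hj, hget]
    by_cases hcmp : pyMaxInt key < pyMaxInt b
    · have hcond : ((p.length : Int) ≥ 0 ∧ pyMaxInt key < pyMaxInt b) := ⟨by positivity, hcmp⟩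
      rw [if_pos hcond]
      have hset : ((p ++ [b]) ++ hole :: rest).set ((p.length : Int) + 1).toNat b
          = p ++ b :: b :: rest := by
        have : ((p.length : Int) + 1).toNat = p.length + 1 := by omega
        rw [this]
        simp
      rw [hset]
      rw [show ((p.length : Int)) - 1 = ((p.length : Nat) : Int) - 1 from rfl]
      rw [ih hp b key (b :: rest)]
      rw [insertBy_append_last key b p (by simp [befMax]; exact hcmp)]
      simp
    · have hcond : ¬ ((p.length : Int) ≥ 0 ∧ pyMaxInt key < pyMaxInt b) := by
        intro h; exact hcmp h.2
      rw [if_neg hcond]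
      have hset : ((p ++ [b]) ++ hole :: rest).set ((p.length : Int) + 1).toNat key
          = (p ++ [b]) ++ key :: rest := by
        have : ((p.length : Int) + 1).toNat = p.length + 1 := by omega
        rw [this]
        simp
      rw [hset]
      have hall : ∀ y ∈ p ++ [b], befMax key y = false := by
        intro y hy
        rcases List.mem_append.mp hy with hyp | hyb
        · have h1 : pyMaxInt y ≤ pyMaxInt b := hpb y hyp b (List.mem_singleton_self b)
          simp [befMax]; omega
        · rw [List.mem_singleton.mp hyb]
          simp [befMax]; omega
      rw [show ins key (p ++ [b]) = PySem.List.insertBy befMax key (p ++ [b]) from rfl]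
      rw [PySem.List.insertBy_of_forall_not_before befMax key (p ++ [b]) hall]
      simp

-- the outer for-loop invariant: after processing indices 1..m-1 the first m
-- elements are the stable sort of the original first m elements.
theorem uredi_outer (m : Nat) (orig : List (List Int)) (h1 : 1 ≤ m) (hm : m ≤ orig.length) :
    (PySem.List.pyRange 1 (m : Int)).foldl
      (fun s i =>
        let key := (PySem.List.pyGet? s i).getD []
        urediInner i.toNat s key (i - 1)) orig
      = PySem.List.sorted (orig.take m) pyMaxInt ++ orig.drop m := by
  induction m with
  | zero => omega
  | succ m ih =>
    by_cases hm1 : m = 0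
    · subst hm1
      have hr : PySem.List.pyRange 1 ((0 + 1 : Nat) : Int) = [] := by norm_num [PySem.List.pyRange]
      rw [hr]
      obtain ⟨x, t, rfl⟩ : ∃ x t, orig = x :: t := by
        cases orig with
        | nil => simp at hm
        | cons x t => exact ⟨x, t, rfl⟩
      simp [PySem.List.sorted_eq_foldl_insertBy, PySem.List.insertBy]
    · have h1m : 1 ≤ m := by omega
      have hmlen : m ≤ orig.length := by omega
      have hsplit : PySem.List.pyRange 1 ((m + 1 : Nat) : Int)
          = PySem.List.pyRange 1 (m : Int) ++ [(m : Int)] := by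
        rw [PySem.List.pyRange_one_append 1 (m : Int) ((m + 1 : Nat) : Int) (by exact_mod_cast h1m) (by push_cast; omega)]
        congr 1
        rw [PySem.List.pyRange_one_cons (by push_cast; omega)]
        simp [PySem.List.pyRange]
      rw [hsplit, List.foldl_append, ih h1m hmlen]
      simp only [List.foldl_cons, List.foldl_nil]
      have hmlt : m < orig.length := by omega
      have hslen : (PySem.List.sorted (orig.take m) pyMaxInt).length = m := by
        rw [PySem.List.length_sorted]; simp [hmlen]
      have hdrop : orig.drop m = orig[m] :: orig.drop (m + 1) := List.drop_eq_getElem_cons hmlt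
      have hget : (PySem.List.pyGet?
          (PySem.List.sorted (orig.take m) pyMaxInt ++ orig.drop m) ((m : Nat) : Int)).getD [] = orig[m] := by
        rw [PySem.List.pyGet?_natCast]
        rw [List.getElem?_append_right (by omega)]
        rw [hdrop, hslen]
        simp [List.getElem?_eq_getElem hmlt]
      simp only [hget]
      have hfuel : ((m : Nat) : Int).toNat = m := by omega
      rw [hfuel, hdrop]
      have hins := urediInner_spec (PySem.List.sorted (orig.take m) pyMaxInt)
        (PySem.List.sorted_pairwise (orig.take m) pyMaxInt) orig[m] orig[m] (orig.drop (m + 1))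
      rw [hslen] at hins
      rw [hins]
      have htake : orig.take (m + 1) = orig.take m ++ [orig[m]] := by
        rw [List.take_add_one]; simp [List.getElem?_eq_getElem hmlt]
      rw [htake]
      rw [PySem.List.sorted_eq_foldl_insertBy (orig.take m ++ [orig[m]]) pyMaxInt,
          List.foldl_append, ← PySem.List.sorted_eq_foldl_insertBy]
      rfl

theorem uredi_eq_sorted (seznam : List (List Int)) :
    uredi_po_max seznam = PySem.List.sorted seznam pyMaxInt := by
  unfold uredi_po_max
  cases seznam with
  | nil => simp [PySem.List.pyRange, PySem.List.sorted_eq_foldl_insertBy]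
  | cons x t =>
    have h := uredi_outer (x :: t).length (x :: t) (by simp) (le_refl _)
    simp only [List.take_length, List.drop_length, List.append_nil] at h
    exact h

-- ---------- B-side: the merge-sort port computes PySem.List.sorted ----------

-- two insertions with strictly smaller first key commute
theorem ins_comm (a y : List Int) (h : pyMaxInt a < pyMaxInt y) :
    ∀ acc, ins a (ins y acc) = ins y (ins a acc) := by
  intro acc
  induction acc with
  | nil =>
    simp [ins_nil, insertBy_cons, befMax, h, not_lt_of_gt h]
  | cons c cs ihc =>
    by_cases hac : pyMaxInt a < pyMaxInt c
    · by_cases hyc : pyMaxInt y < pyMaxInt c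
      · simp [insertBy_cons, befMax, hac, hyc, not_lt_of_gt h]
        omega
      · simp [insertBy_cons, befMax, hac, hyc, not_lt_of_gt h]
    · have hyc : ¬ pyMaxInt y < pyMaxInt c := by omega
      simp [insertBy_cons, befMax, hac, hyc, ihc]

-- a batch of strictly smaller insertions moves across a pending insertion
theorem foldl_ins_comm (y : List Int) (p : List (List Int))
    (hp : ∀ a ∈ p, pyMaxInt a < pyMaxInt y) :
    ∀ acc, p.foldl (fun acc x => ins x acc) (ins y acc)
      = ins y (p.foldl (fun acc x => ins x acc) acc) := by
  induction p with
  | nil => intro acc; rfl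
  | cons a p ih =>
    intro acc
    simp only [List.foldl_cons]
    rw [ins_comm a y (hp a (by simp))]
    exact ih (fun x hx => hp x (by simp [hx])) (ins a acc)

-- inserting y 'before its ties' in a list, as a takeWhile/dropWhile split
def insB4 (y : List Int) (l : List (List Int)) : List (List Int) :=
  l.takeWhile (fun a => befMax a y) ++ y :: l.dropWhile (fun a => befMax a y)

theorem ins_insB4 (z y : List Int) :
    ∀ acc, ins z (insB4 y acc) = insB4 y (ins z acc) := by
  intro acc
  induction acc with
  | nil =>
    by_cases hzy : pyMaxInt z < pyMaxInt y <;>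
      simp [insB4, ins_nil, insertBy_cons, befMax, hzy]
  | cons c cs ihc =>
    by_cases hcy : pyMaxInt c < pyMaxInt y
    · by_cases hzc : pyMaxInt z < pyMaxInt c
      · have hzy : pyMaxInt z < pyMaxInt y := by omega
        simp [insB4, insertBy_cons, befMax, hcy, hzc, hzy]
      · have lhs : ins z (insB4 y (c :: cs)) = c :: ins z (insB4 y cs) := by
          simp [insB4, befMax, hcy, insertBy_cons, hzc]
        have rhs : insB4 y (ins z (c :: cs)) = c :: insB4 y (ins z cs) := by
          simp [insertBy_cons, befMax, hzc, insB4, hcy]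
        rw [lhs, rhs, ihc]
    · by_cases hzc : pyMaxInt z < pyMaxInt c
      · by_cases hzy : pyMaxInt z < pyMaxInt y <;>
          simp [insB4, befMax, hcy, hzc, hzy, insertBy_cons]
      · have hzy : ¬ pyMaxInt z < pyMaxInt y := by omega
        simp [insB4, befMax, hcy, hzc, hzy, insertBy_cons]

-- foldl-insertion of y :: ys builds insB4 y around the insertion of ys
theorem foldl_ins_insB4 (ys : List (List Int)) (y : List Int) :
    ∀ acc, ys.foldl (fun acc x => ins x acc) (insB4 y acc)
      = insB4 y (ys.foldl (fun acc x => ins x acc) acc) := by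
  induction ys with
  | nil => intro acc; rfl
  | cons z zs ih =>
    intro acc
    simp only [List.foldl_cons]
    rw [ins_insB4 z y acc]
    exact ih (ins z acc)

theorem sorted_cons_insB4 (y : List Int) (ys : List (List Int)) :
    PySem.List.sorted (y :: ys) pyMaxInt = insB4 y (PySem.List.sorted ys pyMaxInt) := by
  rw [PySem.List.sorted_eq_foldl_insertBy (y :: ys) pyMaxInt,
      PySem.List.sorted_eq_foldl_insertBy ys pyMaxInt]
  simp only [List.foldl_cons]
  have h0 : PySem.List.insertBy (fun a b => decide (pyMaxInt a < pyMaxInt b)) y ([] : List (List Int)) = insB4 y [] := by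
    simp [PySem.List.insertBy, insB4]
  rw [h0]
  exact foldl_ins_insB4 ys y []

-- inserting a pre-sorted batch gives the same result as inserting the raw batch
theorem foldl_ins_sorted (ys : List (List Int)) :
    ∀ acc, (PySem.List.sorted ys pyMaxInt).foldl (fun acc x => ins x acc) acc
      = ys.foldl (fun acc x => ins x acc) acc := by
  induction ys with
  | nil => intro acc; rfl
  | cons y ys ih =>
    intro acc
    rw [sorted_cons_insB4]
    set s := PySem.List.sorted ys pyMaxInt with hs
    have hsplit : insB4 y s = s.takeWhile (fun a => befMax a y) ++ y :: s.dropWhile (fun a => befMax a y) := rfl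
    rw [hsplit, List.foldl_append]
    simp only [List.foldl_cons]
    have htd : s.takeWhile (fun a => befMax a y) ++ s.dropWhile (fun a => befMax a y) = s :=
      List.takeWhile_append_dropWhile
    have hp : ∀ a ∈ s.takeWhile (fun a => befMax a y), pyMaxInt a < pyMaxInt y := by
      intro a ha
      have := List.mem_takeWhile_imp ha
      simpa [befMax] using this
    calc (s.dropWhile (fun a => befMax a y)).foldl (fun acc x => ins x acc)
            (ins y ((s.takeWhile (fun a => befMax a y)).foldl (fun acc x => ins x acc) acc))
        = (s.dropWhile (fun a => befMax a y)).foldl (fun acc x => ins x acc)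
            ((s.takeWhile (fun a => befMax a y)).foldl (fun acc x => ins x acc) (ins y acc)) := by
          rw [foldl_ins_comm y _ hp]
      _ = s.foldl (fun acc x => ins x acc) (ins y acc) := by
          rw [← htd, List.foldl_append]; rw [htd]
      _ = ys.foldl (fun acc x => ins x acc) (ins y acc) := ih (ins y acc)

-- prefix of already-placed smaller-keyed elements passes through a fold of insertions
theorem insertBy_append_ge (y : List Int) (p s : List (List Int))
    (hp : ∀ a ∈ p, ¬ pyMaxInt y < pyMaxInt a) :
    ins y (p ++ s) = p ++ ins y s := by
  induction p with
  | nil => rfl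
  | cons a p ih =>
    simp only [List.cons_append, insertBy_cons]
    have : befMax y a = false := by simp [befMax]; exact (by have := hp a (by simp); omega)
    simp [this, ih (fun x hx => hp x (by simp [hx]))]

theorem foldl_ins_prefix (rs : List (List Int)) :
    ∀ p s, (∀ a ∈ p, ∀ b ∈ rs, ¬ pyMaxInt b < pyMaxInt a) →
      rs.foldl (fun acc x => ins x acc) (p ++ s) = p ++ rs.foldl (fun acc x => ins x acc) s := by
  induction rs with
  | nil => intro p s _; rfl
  | cons b rs ih =>
    intro p s hp
    simp only [List.foldl_cons]
    rw [insertBy_append_ge b p s (fun a ha => hp a ha b (by simp))]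
    exact ih p (ins b s) (fun a ha x hx => hp a ha x (by simp [hx]))

-- the merge of two sorted lists inserts the right list into the left
theorem mergeB_eq_foldl (l r : List (List Int))
    (hl : l.Pairwise (fun a b => pyMaxInt a ≤ pyMaxInt b))
    (hr : r.Pairwise (fun a b => pyMaxInt a ≤ pyMaxInt b)) :
    mergeB l r = r.foldl (fun acc x => ins x acc) l := by
  induction l, r using mergeB.induct with
  | case1 r =>
    rw [show mergeB [] r = r from by cases r <;> simp [mergeB]]
    have h1 : r.foldl (fun acc x => ins x acc) [] = PySem.List.sorted r pyMaxInt :=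
      (PySem.List.sorted_eq_foldl_insertBy r pyMaxInt).symm
    rw [h1, PySem.List.sorted_eq_self_of_pairwise r pyMaxInt hr]
  | case2 l h =>
    have h2 : mergeB l [] = l := by cases l <;> simp [mergeB]
    simp [h2]
  | case3 a l' b r' hab ih =>
    rw [show mergeB (a :: l') (b :: r') = a :: mergeB l' (b :: r') from by rw [mergeB]; simp [hab]]
    rw [ih (List.Pairwise.of_cons hl) hr]
    have hble : ∀ c ∈ b :: r', ¬ pyMaxInt c < pyMaxInt a := by
      intro c hc
      rcases List.mem_cons.mp hc with rfl | hc'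
      · omega
      · have := (List.pairwise_cons.mp hr).1 c hc'; omega
    have := foldl_ins_prefix (b :: r') [a] l' (by intro x hx; simp at hx; subst hx; exact hble)
    simpa using this.symm
  | case4 a l' b r' hab ih =>
    rw [show mergeB (a :: l') (b :: r') = b :: mergeB (a :: l') r' from by rw [mergeB]; simp [hab]]
    rw [ih hl (List.Pairwise.of_cons hr)]
    have hstep : ins b (a :: l') = b :: a :: l' := by
      rw [insertBy_cons]
      simp [befMax]; omega
    have hrle : ∀ c ∈ r', ¬ pyMaxInt c < pyMaxInt b := by
      intro c hc'
      have := (List.pairwise_cons.mp hr).1 c hc'; omega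
    simp only [List.foldl_cons, hstep]
    have := foldl_ins_prefix r' [b] (a :: l') (by intro x hx; simp at hx; subst hx; exact hrle)
    simpa using this.symm

-- merge sort computes the stable insertion sort
theorem msortB_eq_sorted (xs : List (List Int)) :
    msortB xs = PySem.List.sorted xs pyMaxInt := by
  induction xs using msortB.induct with
  | case1 xs h =>
    rw [msortB, dif_pos h]
    match xs, h with
    | [], _ => rfl
    | [x], _ => rfl
  | case2 xs h ih1 ih2 =>
    rw [msortB, dif_neg h, ih1, ih2]
    rw [mergeB_eq_foldl _ _ (PySem.List.sorted_pairwise _ _) (PySem.List.sorted_pairwise _ _)]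
    rw [foldl_ins_sorted]
    rw [PySem.List.sorted_eq_foldl_insertBy (xs.take (xs.length / 2)) pyMaxInt]
    rw [show (fun acc x => ins x acc)
          = (fun acc x => PySem.List.insertBy (fun a b => decide (pyMaxInt a < pyMaxInt b)) x acc) from rfl]
    rw [← List.foldl_append, List.take_append_drop]
    exact (PySem.List.sorted_eq_foldl_insertBy xs pyMaxInt).symm

-- ===== VERDICT (by name: the statement is the Claim_ definition above) =====
theorem uredi_po_max_spec : Claim_equal_uredi_po_max := by
  intro seznam _ _
  unfold Spec_uredi_po_max uredi_po_max_alt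
  rw [uredi_eq_sorted, msortB_eq_sorted]
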